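-- pv_equiv track=rewrite | github.com/SRendonn/analisis-diseno-algoritmos | utils/river_travelling.py | river_travelling
-- ===== SOURCE A (Python) =====
-- def river_travelling(cost_matrix):
--     N = len(cost_matrix)
--     M = [[0 for x in range(N)] for x in range(N)]
--     for steps in range(1, N):
--         for i in range(N - steps):
--             j = i + steps
--             lowest = cost_matrix[i][j]
--             for k in range(i + 1, j):
--                 lowest = min(lowest, M[k][j] + M[i][k])
--             M[i][j] = lowest
--     return M[0][-1]
-- ===== SOURCE B (Python) =====
-- def river_travelling(cost_matrix):
--     n = len(cost_matrix)
--     memo = {}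
--
--     def solve(i, j):
--         if i == j:
--             return 0
--         if (i, j) in memo:
--             return memo[(i, j)]
--         lowest = cost_matrix[i][j]
--         for k in range(i + 1, j):
--             lowest = min(lowest, solve(i, k) + solve(k, j))
--         memo[(i, j)] = lowest
--         return lowest
--
--     return solve(0, n - 1)
-- ===== Notes on version B (the rewrite author's own statement) =====
-- stated objective: alternative
-- what changed: Replaced the bottom-up interval-DP table (triple nested loop filling M by increasing interval length) with top-down memoized recursion solve(i,j) over intervals, caching results in a dict.
import Mathlib
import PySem

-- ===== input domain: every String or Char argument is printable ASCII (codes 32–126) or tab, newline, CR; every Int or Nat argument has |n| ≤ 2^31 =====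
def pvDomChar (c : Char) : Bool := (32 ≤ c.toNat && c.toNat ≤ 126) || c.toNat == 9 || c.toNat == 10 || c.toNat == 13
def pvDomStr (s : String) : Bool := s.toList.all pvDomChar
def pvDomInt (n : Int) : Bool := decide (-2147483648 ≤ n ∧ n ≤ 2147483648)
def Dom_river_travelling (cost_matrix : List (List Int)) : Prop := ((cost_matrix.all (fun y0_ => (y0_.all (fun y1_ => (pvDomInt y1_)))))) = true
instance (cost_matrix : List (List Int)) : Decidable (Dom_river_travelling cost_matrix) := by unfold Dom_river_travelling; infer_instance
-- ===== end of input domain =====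

-- B replaces A's bottom-up interval-DP table with top-down memoized recursion over intervals; objective: alternative decomposition, same O(n^3) cost.


-- ===== PORT A =====
-- 2D read cm[i][j] (indices produced by the Python loops are always nonnegative and,
-- under Pre_, in range; the default 0 is never consulted there)
def pvGet2 (m : List (List Int)) (i j : Nat) : Int := (m.getD i []).getD j 0

-- 2D write M[i][j] = v
def pvSet2 (m : List (List Int)) (i j : Nat) (v : Int) : List (List Int) :=
  m.set i ((m.getD i []).set j v)

-- literal port of A: build the N×N zero table, fill by increasing interval length `steps`
def river_travelling (cost_matrix : List (List Int)) : Int :=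
  let N := cost_matrix.length
  let M0 : List (List Int) := List.replicate N (List.replicate N 0)
  let M := (List.range' 1 (N - 1)).foldl (fun M steps =>
      (List.range (N - steps)).foldl (fun M i =>
        let j := i + steps
        let lowest := (List.range' (i + 1) (j - (i + 1))).foldl
            (fun low k => min low (pvGet2 M k j + pvGet2 M i k)) (pvGet2 cost_matrix i j)
        pvSet2 M i j lowest) M) M0
  -- M[0][-1]: under Pre_ (N ≥ 1) the last element of row 0, i.e. index N-1
  pvGet2 M 0 (N - 1)

-- ===== PORT B =====
-- solve(i,j) of Source B, memo threaded explicitly; `fuel` only makes the recursion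
-- structural (fuel ≥ j - i at every call, so the 0 branch is never reached).
mutual
def pvSolve (cm : List (List Int)) : Nat → Nat → Nat → PySem.Dict (Nat × Nat) Int → Int × PySem.Dict (Nat × Nat) Int
  | 0, _, _, memo => (0, memo)
  | fuel + 1, i, j, memo =>
    if i = j then (0, memo)
    else
      match memo.get? (i, j) with
      | some v => (v, memo)
      | none =>
        let p := pvLoop cm fuel i j (List.range' (i + 1) (j - (i + 1))) (pvGet2 cm i j) memo
        (p.1, p.2.insert (i, j) p.1)
termination_by fuel _ _ _ => (fuel, 0)

def pvLoop (cm : List (List Int)) (fuel i j : Nat) : List Nat → Int → PySem.Dict (Nat × Nat) Int → Int × PySem.Dict (Nat × Nat) Int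
  | [], low, memo => (low, memo)
  | k :: ks, low, memo =>
    let p1 := pvSolve cm fuel i k memo
    let p2 := pvSolve cm fuel k j p1.2
    pvLoop cm fuel i j ks (min low (p1.1 + p2.1)) p2.2
termination_by l _ _ => (fuel, l.length + 1)
end

def river_travelling_alt (cost_matrix : List (List Int)) : Int :=
  let n := cost_matrix.length
  (pvSolve cost_matrix n 0 (n - 1) PySem.Dict.empty).1

-- ===== PRECONDITION & SPEC =====
-- Pre_ = exactly the inputs on which Python A returns (no IndexError): at least one row,
-- and every row except possibly the last long enough for the rightmost column accessed.
def Pre_river_travelling (cost_matrix : List (List Int)) : Prop :=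
  1 ≤ cost_matrix.length ∧
    ∀ i < cost_matrix.length - 1, cost_matrix.length ≤ (cost_matrix.getD i []).length
instance (cost_matrix : List (List Int)) : Decidable (Pre_river_travelling cost_matrix) := by
  unfold Pre_river_travelling; infer_instance

def pvWitness_river_travelling : List (List Int) := [[0, 3, 10], [0, 0, 4], [0, 0, 0]]

def Spec_river_travelling (cost_matrix : List (List Int)) (out : Int) : Prop := out = river_travelling_alt cost_matrix
instance (cost_matrix : List (List Int)) (out : Int) : Decidable (Spec_river_travelling cost_matrix out) := by unfold Spec_river_travelling; infer_instance

-- ===== CLAIM (what is proved, stated in full; the proofs are below) =====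
def Claim_equal_river_travelling : Prop := ∀ (cost_matrix : List (List Int)), Dom_river_travelling cost_matrix → Pre_river_travelling cost_matrix → Spec_river_travelling cost_matrix (river_travelling cost_matrix)

-- ===== LEMMAS AND PROOFS =====

-- the common mathematical value: optimal cost of interval (i, j), by fuel recursion
def pvOptF (cm : List (List Int)) : Nat → Nat → Nat → Int
  | 0, _, _ => 0
  | f + 1, i, j =>
    if i = j then 0
    else (List.range' (i + 1) (j - (i + 1))).foldl
        (fun low k => min low (pvOptF cm f i k + pvOptF cm f k j)) (pvGet2 cm i j)

def pvOPT (cm : List (List Int)) (i j : Nat) : Int := pvOptF cm (j - i) i j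

theorem pvOptF_eq_OPT (cm : List (List Int)) :
    ∀ d f i j, j - i ≤ d → i < j → j - i ≤ f → pvOptF cm f i j = pvOPT cm i j := by
  intro d
  induction d with
  | zero => intro f i j h1 h2 _; omega
  | succ d ih =>
    intro f i j hd hij hf
    obtain ⟨f', rfl⟩ : ∃ f', f = f' + 1 := ⟨f - 1, by omega⟩
    obtain ⟨e, he⟩ : ∃ e, j - i = e + 1 := ⟨j - i - 1, by omega⟩
    unfold pvOPT
    rw [he]
    show (if i = j then 0
        else (List.range' (i + 1) (j - (i + 1))).foldl
          (fun low k => min low (pvOptF cm f' i k + pvOptF cm f' k j)) (pvGet2 cm i j)) =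
      (if i = j then 0
        else (List.range' (i + 1) (j - (i + 1))).foldl
          (fun low k => min low (pvOptF cm e i k + pvOptF cm e k j)) (pvGet2 cm i j))
    rw [if_neg (by omega), if_neg (by omega)]
    apply PySem.List.foldl_congr_mem
    intro acc k hk
    have hk' := List.mem_range'_1.mp hk
    rw [ih f' i k (by omega) (by omega) (by omega), ih e i k (by omega) (by omega) (by omega),
        ih f' k j (by omega) (by omega) (by omega), ih e k j (by omega) (by omega) (by omega)]

theorem pvOPT_self (cm : List (List Int)) (i : Nat) : pvOPT cm i i = 0 := by
  simp [pvOPT, pvOptF]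

theorem pvOPT_unfold (cm : List (List Int)) (i j : Nat) (hij : i < j) :
    pvOPT cm i j = (List.range' (i + 1) (j - (i + 1))).foldl
      (fun low k => min low (pvOPT cm i k + pvOPT cm k j)) (pvGet2 cm i j) := by
  conv_lhs => rw [pvOPT]
  obtain ⟨e, he⟩ : ∃ e, j - i = e + 1 := ⟨j - i - 1, by omega⟩
  rw [he]
  show (if i = j then 0
      else (List.range' (i + 1) (j - (i + 1))).foldl
        (fun low k => min low (pvOptF cm e i k + pvOptF cm e k j)) (pvGet2 cm i j)) = _
  rw [if_neg (by omega)]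
  apply PySem.List.foldl_congr_mem
  intro acc k hk
  have hk' := List.mem_range'_1.mp hk
  rw [pvOptF_eq_OPT cm e e i k (by omega) (by omega) (by omega),
      pvOptF_eq_OPT cm e e k j (by omega) (by omega) (by omega)]

-- ---- A-side: the bottom-up table ----
theorem pvGetD_set {α : Type} (l : List α) (i j : Nat) (a d : α) :
    (l.set i a).getD j d = if j = i ∧ i < l.length then a else l.getD j d := by
  simp only [List.getD_eq_getElem?_getD, List.getElem?_set]
  split_ifs with h1 h2 h3 <;> simp_all

-- the inner body of A's double loop, as a named function
def pvBody (cm : List (List Int)) (s : Nat) (M : List (List Int)) (i : Nat) : List (List Int) :=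
  pvSet2 M i (i + s)
    ((List.range' (i + 1) (i + s - (i + 1))).foldl
      (fun low k => min low (pvGet2 M k (i + s) + pvGet2 M i k)) (pvGet2 cm i (i + s)))

def pvShape (N : Nat) (M : List (List Int)) : Prop :=
  M.length = N ∧ ∀ r ∈ M, r.length = N

-- invariant: entries of intervals shorter than s, and of length s starting below i0, are filled
def pvTbl (cm : List (List Int)) (N s i0 : Nat) (M : List (List Int)) : Prop :=
  pvShape N M ∧ ∀ i j, i < N → j < N →
    pvGet2 M i j = if i < j ∧ (j - i < s ∨ (j - i = s ∧ i < i0)) then pvOPT cm i j else 0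

theorem pvShape_set (N : Nat) (M : List (List Int)) (i j : Nat) (v : Int)
    (hs : pvShape N M) (hi : i < N) : pvShape N (pvSet2 M i j v) := by
  have hL : M.length = N := hs.1
  refine ⟨by simp [pvSet2, hL], ?_⟩
  intro r hr
  rcases List.mem_or_eq_of_mem_set hr with h | h
  · exact hs.2 r h
  · have hrow : M.getD i [] = M[i]'(by omega) := List.getD_eq_getElem M [] (by omega)
    have hlen : (M.getD i []).length = N := by rw [hrow]; exact hs.2 _ (List.getElem_mem _)
    rw [h, List.length_set]
    exact hlen

theorem pvGet2_set (N : Nat) (M : List (List Int)) (i j : Nat) (v : Int)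
    (hs : pvShape N M) (hi : i < N) (hj : j < N) (i' j' : Nat) :
    pvGet2 (pvSet2 M i j v) i' j' = if i' = i ∧ j' = j then v else pvGet2 M i' j' := by
  have hL : M.length = N := hs.1
  unfold pvGet2 pvSet2
  rw [pvGetD_set]
  by_cases hii : i' = i
  · subst hii
    have hrow : M.getD i' [] = M[i']'(by omega) := List.getD_eq_getElem M [] (by omega)
    have hlen : (M.getD i' []).length = N := by rw [hrow]; exact hs.2 _ (List.getElem_mem _)
    rw [if_pos ⟨rfl, by omega⟩, pvGetD_set]
    by_cases hjj : j' = j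
    · subst hjj
      rw [if_pos ⟨rfl, by omega⟩, if_pos ⟨rfl, rfl⟩]
    · rw [if_neg (by tauto), if_neg (by tauto)]
  · rw [if_neg (by tauto), if_neg (by tauto)]

theorem pvTbl_init (cm : List (List Int)) (N : Nat) :
    pvTbl cm N 1 0 (List.replicate N (List.replicate N 0)) := by
  refine ⟨⟨by simp, by intro r hr; rw [List.eq_of_mem_replicate hr]; simp⟩, ?_⟩
  intro i j hi hj
  rw [if_neg (by omega)]
  simp [pvGet2, hi, hj]

theorem pvTbl_body (cm : List (List Int)) (N s i : Nat) (M : List (List Int))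
    (hs1 : 1 ≤ s) (hiN : i + s < N) (H : pvTbl cm N s i M) :
    pvTbl cm N s (i + 1) (pvBody cm s M i) := by
  have hlow : (List.range' (i + 1) (i + s - (i + 1))).foldl
      (fun low k => min low (pvGet2 M k (i + s) + pvGet2 M i k)) (pvGet2 cm i (i + s))
      = pvOPT cm i (i + s) := by
    rw [pvOPT_unfold cm i (i + s) (by omega)]
    apply PySem.List.foldl_congr_mem
    intro acc k hk
    have hk' := List.mem_range'_1.mp hk
    rw [H.2 k (i + s) (by omega) (by omega), H.2 i k (by omega) (by omega),
        if_pos ⟨by omega, Or.inl (by omega)⟩, if_pos ⟨by omega, Or.inl (by omega)⟩,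
        Int.add_comm]
  refine ⟨pvShape_set N M i (i + s) _ H.1 (by omega), ?_⟩
  intro i' j' hi' hj'
  unfold pvBody
  rw [pvGet2_set N M i (i + s) _ H.1 (by omega) (by omega)]
  by_cases hij : i' = i ∧ j' = i + s
  · rw [if_pos hij, hlow, hij.1, hij.2, if_pos ⟨by omega, Or.inr ⟨by omega, by omega⟩⟩]
  · rw [if_neg hij, H.2 i' j' hi' hj']
    exact if_congr (by constructor <;> (intro h'; refine ⟨h'.1, ?_⟩) <;> omega) rfl rfl

theorem pvTbl_inner (cm : List (List Int)) (N s : Nat) (hs1 : 1 ≤ s) :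
    ∀ (cnt i0 : Nat) (M : List (List Int)), pvTbl cm N s i0 M → i0 + cnt + s ≤ N →
      pvTbl cm N s (i0 + cnt) ((List.range' i0 cnt).foldl (pvBody cm s) M) := by
  intro cnt
  induction cnt with
  | zero => intro i0 M H _; simpa using H
  | succ cnt ih =>
    intro i0 M H hle
    rw [List.range'_succ, List.foldl_cons]
    have h2 := ih (i0 + 1) (pvBody cm s M i0) (pvTbl_body cm N s i0 M hs1 (by omega) H) (by omega)
    have h3 : i0 + 1 + cnt = i0 + (cnt + 1) := by omega
    rwa [h3] at h2

theorem pvTbl_shift (cm : List (List Int)) (N s : Nat) (M : List (List Int))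
    (H : pvTbl cm N s (N - s) M) : pvTbl cm N (s + 1) 0 M := by
  refine ⟨H.1, ?_⟩
  intro i j hi hj
  rw [H.2 i j hi hj]
  exact if_congr (by constructor <;> (intro h'; refine ⟨h'.1, ?_⟩) <;> omega) rfl rfl

theorem pvTbl_outer (cm : List (List Int)) (N : Nat) :
    ∀ (t s : Nat) (M : List (List Int)), 1 ≤ s → s + t = N → pvTbl cm N s 0 M →
      pvTbl cm N N 0
        ((List.range' s t).foldl
          (fun M steps => (List.range (N - steps)).foldl (pvBody cm steps) M) M) := by
  intro t
  induction t with
  | zero =>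
    intro s M hs1 hsum H
    simp only [List.range'_zero, List.foldl_nil]
    obtain rfl : N = s := by omega
    exact H
  | succ t ih =>
    intro s M hs1 hsum H
    rw [List.range'_succ, List.foldl_cons]
    apply ih (s + 1) _ (by omega) (by omega)
    apply pvTbl_shift cm N s
    have h1 := pvTbl_inner cm N s hs1 (N - s) 0 M H (by omega)
    rw [List.range_eq_range']
    simpa using h1

theorem river_A_eq_OPT (cm : List (List Int)) (h : 1 ≤ cm.length) :
    river_travelling cm = pvOPT cm 0 (cm.length - 1) := by
  show pvGet2
      ((List.range' 1 (cm.length - 1)).foldl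
        (fun M steps => (List.range (cm.length - steps)).foldl (pvBody cm steps) M)
        (List.replicate cm.length (List.replicate cm.length 0)))
      0 (cm.length - 1) = pvOPT cm 0 (cm.length - 1)
  have H := pvTbl_outer cm cm.length (cm.length - 1) 1 _ (by omega) (by omega)
    (pvTbl_init cm cm.length)
  rw [H.2 0 (cm.length - 1) (by omega) (by omega)]
  by_cases h1 : cm.length = 1
  · rw [if_neg (by omega), h1, pvOPT_self]
  · rw [if_pos ⟨by omega, Or.inl (by omega)⟩]

-- memo invariant: every cached value is the optimal cost of its interval
def pvGood (cm : List (List Int)) (memo : PySem.Dict (Nat × Nat) Int) : Prop :=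
  ∀ p v, memo.get? p = some v → v = pvOPT cm p.1 p.2

theorem pvLoop_correct (cm : List (List Int)) (fuel : Nat)
    (hsolve : ∀ i j memo, pvGood cm memo → i ≤ j → j - i ≤ fuel →
      (pvSolve cm fuel i j memo).1 = pvOPT cm i j ∧ pvGood cm (pvSolve cm fuel i j memo).2) :
    ∀ ks i j low memo, pvGood cm memo → (∀ k ∈ ks, i < k ∧ k < j) → j - 1 - i ≤ fuel →
      (pvLoop cm fuel i j ks low memo).1
        = ks.foldl (fun low k => min low (pvOPT cm i k + pvOPT cm k j)) low
      ∧ pvGood cm (pvLoop cm fuel i j ks low memo).2 := by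
  intro ks
  induction ks with
  | nil => intro i j low memo hg _ _; rw [pvLoop]; exact ⟨rfl, hg⟩
  | cons k ks ih =>
    intro i j low memo hg hk hf
    have hkk := hk k (List.mem_cons_self)
    have h1 := hsolve i k memo hg (by omega) (by omega)
    have h2 := hsolve k j (pvSolve cm fuel i k memo).2 h1.2 (by omega) (by omega)
    have h3 := ih i j (min low ((pvSolve cm fuel i k memo).1 +
        (pvSolve cm fuel k j (pvSolve cm fuel i k memo).2).1))
        (pvSolve cm fuel k j (pvSolve cm fuel i k memo).2).2 h2.2
        (fun k hk' => hk k (List.mem_cons_of_mem _ hk')) hf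
    rw [pvLoop]
    refine ⟨?_, h3.2⟩
    rw [h3.1, h1.1, h2.1, List.foldl_cons]

theorem pvSolve_correct (cm : List (List Int)) :
    ∀ fuel i j memo, pvGood cm memo → i ≤ j → j - i ≤ fuel →
      (pvSolve cm fuel i j memo).1 = pvOPT cm i j ∧ pvGood cm (pvSolve cm fuel i j memo).2 := by
  intro fuel
  induction fuel with
  | zero =>
    intro i j memo hg hij hf
    have : i = j := by omega
    subst this
    rw [pvSolve]
    exact ⟨(pvOPT_self cm i).symm, hg⟩
  | succ fuel ih =>
    intro i j memo hg hij hf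
    rw [pvSolve]
    by_cases hij' : i = j
    · subst hij'
      simp only [if_pos]
      exact ⟨(pvOPT_self cm i).symm, hg⟩
    · rw [if_neg hij']
      cases hmem : memo.get? (i, j) with
      | some v => exact ⟨hg (i, j) v hmem, hg⟩
      | none =>
        have hloop := pvLoop_correct cm fuel ih
          (List.range' (i + 1) (j - (i + 1))) i j (pvGet2 cm i j) memo hg
          (fun k hk => by have := List.mem_range'_1.mp hk; omega) (by omega)
        have hval : (pvLoop cm fuel i j (List.range' (i + 1) (j - (i + 1)))
            (pvGet2 cm i j) memo).1 = pvOPT cm i j := by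
          rw [hloop.1, pvOPT_unfold cm i j (by omega)]
        refine ⟨hval, ?_⟩
        intro p v hpv
        rw [PySem.Dict.get?_insert] at hpv
        by_cases hp : p = (i, j)
        · rw [if_pos hp] at hpv
          cases hpv
          rw [hp, hval]
        · rw [if_neg hp] at hpv
          exact hloop.2 p v hpv

theorem pvGood_empty (cm : List (List Int)) : pvGood cm PySem.Dict.empty := by
  intro p v h
  simp [PySem.Dict.get?_empty] at h

theorem river_B_eq_OPT (cm : List (List Int)) (h : 1 ≤ cm.length) :
    river_travelling_alt cm = pvOPT cm 0 (cm.length - 1) := by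
  unfold river_travelling_alt
  exact (pvSolve_correct cm cm.length 0 (cm.length - 1) PySem.Dict.empty
    (pvGood_empty cm) (by omega) (by omega)).1

-- ===== VERDICT (by name: the statement is the Claim_ definition above) =====
theorem river_travelling_spec : Claim_equal_river_travelling := by
  intro cm _ hpre
  unfold Spec_river_travelling
  rw [river_A_eq_OPT cm hpre.1, river_B_eq_OPT cm hpre.1]
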